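-- pv_equiv track=rewrite | github.com/anhogan/cs-module-project-algorithms | class_notes_first_pass.py | tallest_building_height
-- ===== SOURCE A (Python) =====
-- def tallest_building_height(buildings):
--   max_floor_count = 0
--
--   # Determine longest string
--   longest_string = 0
--
--   for floor in buildings:
--     if len(floor) > longest_string:
--       longest_string = len(floor)
--
--   # Create a list to track the number of # that occur repeatedly in one column
--   floor_streak = [0] * longest_string
--
--   # Outer loop that loops through each string in the input list
--   for floor in buildings:
--     # Inner loop that loops through each character in that string
--     for idx, char in enumerate(floor):
--       # If the character is equal to #, increment that index in floor_streak
--       if char == '#':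
--         floor_streak[idx] += 1
--         if floor_streak[idx] > max_floor_count:
--           max_floor_count = floor_streak[idx]
--       else:
--         floor_streak[idx] = 0
--
--   # Return max_floor_count * 20 as a string formatted like "heightm"
--   return str(max_floor_count * 20) + 'm'
-- ===== SOURCE B (Python) =====
-- def tallest_building_height(buildings):
--     longest = max((len(b) for b in buildings), default=0)
--     best = 0
--     for c in range(longest):
--         current = 0
--         for row in buildings:
--             if len(row) > c:
--                 if row[c] == '#':
--                     current += 1
--                     if current > best:
--                         best = current
--                 else:
--                     current = 0
--     return str(best * 20) + 'm'
-- ===== Notes on version B (the rewrite author's own statement) =====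
-- stated objective: alternative
-- what changed: column-major traversal keeping one scalar streak counter per column instead of a row-major scan maintaining an array of all column streaks
import Mathlib
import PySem

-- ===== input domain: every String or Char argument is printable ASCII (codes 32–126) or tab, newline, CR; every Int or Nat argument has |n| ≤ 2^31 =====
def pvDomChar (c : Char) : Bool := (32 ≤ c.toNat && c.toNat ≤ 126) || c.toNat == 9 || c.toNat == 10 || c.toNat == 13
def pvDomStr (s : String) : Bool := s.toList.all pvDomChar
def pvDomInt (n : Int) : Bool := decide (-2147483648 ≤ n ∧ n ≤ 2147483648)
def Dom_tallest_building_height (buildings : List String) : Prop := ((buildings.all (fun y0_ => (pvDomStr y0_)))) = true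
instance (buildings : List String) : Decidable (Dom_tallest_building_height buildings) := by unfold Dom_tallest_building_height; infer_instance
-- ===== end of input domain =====

-- B replaces A's row-major scan over an array of per-column streaks by a column-major scan with
-- one scalar streak counter; same cost, different traversal (objective: alternative).

-- ===== PORT A =====
-- inner loop: for idx, char in enumerate(floor)
def pvInnerA : List Char → Nat → List Int → Int → List Int × Int
  | [], _, streak, m => (streak, m)
  | ch :: rest, idx, streak, m =>
    if ch = '#' then
      let v := streak.getD idx 0 + 1
      pvInnerA rest (idx + 1) (streak.set idx v) (if v > m then v else m)
    else
      pvInnerA rest (idx + 1) (streak.set idx 0) m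

-- outer loop: for floor in buildings
def pvOuterA : List String → List Int → Int → List Int × Int
  | [], streak, m => (streak, m)
  | r :: rest, streak, m =>
    let p := pvInnerA r.toList 0 streak m
    pvOuterA rest p.1 p.2

-- first loop: longest string
def pvLongest (buildings : List String) : Nat :=
  buildings.foldl (fun ls r => if r.toList.length > ls then r.toList.length else ls) 0

def tallest_building_height (buildings : List String) : String :=
  let ls := pvLongest buildings
  let res := pvOuterA buildings (List.replicate ls 0) 0
  PySem.Int.toStr (res.2 * 20) ++ "m"

-- ===== PORT B =====
-- inner loop over the rows for one column c (row[c] read via getD, guarded by c < len(row))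
def pvColScan : List String → Nat → Int → Int → Int
  | [], _, _, best => best
  | r :: rest, c, cur, best =>
    if c < r.toList.length then
      if r.toList.getD c ' ' = '#' then
        pvColScan rest c (cur + 1) (if cur + 1 > best then cur + 1 else best)
      else
        pvColScan rest c 0 best
    else
      pvColScan rest c cur best

def tallest_building_height_alt (buildings : List String) : String :=
  let longest := buildings.foldl (fun a r => max a r.toList.length) 0
  let best := (List.range longest).foldl (fun best c => pvColScan buildings c 0 best) 0
  PySem.Int.toStr (best * 20) ++ "m"

-- ===== PRECONDITION & SPEC =====
def Spec_tallest_building_height (buildings : List String) (out : String) : Prop := out = tallest_building_height_alt buildings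
instance (buildings : List String) (out : String) : Decidable (Spec_tallest_building_height buildings out) := by unfold Spec_tallest_building_height; infer_instance

-- ===== CLAIM (what is proved, stated in full; the proofs are below) =====
def Claim_equal_tallest_building_height : Prop := ∀ (buildings : List String), Dom_tallest_building_height buildings → Spec_tallest_building_height buildings (tallest_building_height buildings)

-- ===== LEMMAS AND PROOFS =====

theorem pv_if_gt_max (m v : Int) : (if v > m then v else m) = max m v := by
  rw [max_def]; split_ifs <;> omega

theorem pv_nat_if_gt_max (a b : Nat) : (if b > a then b else a) = max a b := by
  rcases Nat.lt_or_ge a b with h | h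
  · rw [if_pos h, Nat.max_eq_right (Nat.le_of_lt h)]
  · rw [if_neg (Nat.not_lt.mpr h), Nat.max_eq_left h]

theorem pvLongest_eq (buildings : List String) :
    pvLongest buildings = buildings.foldl (fun a r => max a r.toList.length) 0 := by
  unfold pvLongest; simp only [pv_nat_if_gt_max]

theorem pv_foldl_max_init_le (l : List String) : ∀ (a : Nat),
    a ≤ l.foldl (fun a r => max a r.toList.length) a := by
  induction l with
  | nil => intro a; exact le_refl a
  | cons r rest ih =>
    intro a
    simp only [List.foldl_cons]
    exact le_trans (le_max_left a _) (ih _)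

theorem pv_le_foldl_max (buildings : List String) : ∀ (a : Nat) (r : String), r ∈ buildings →
    r.toList.length ≤ buildings.foldl (fun a r => max a r.toList.length) a := by
  induction buildings with
  | nil => intro _ _ hr; cases hr
  | cons x rest ih =>
    intro a r hr
    simp only [List.foldl_cons]
    rcases List.mem_cons.mp hr with h | h
    · subst h
      exact le_trans (le_max_right a _) (pv_foldl_max_init_le rest _)
    · exact ih _ r h

theorem pv_getD_set_ne (streak : List Int) (i c : Nat) (w : Int) (h : i ≠ c) :
    (streak.set i w).getD c 0 = streak.getD c 0 := by
  simp [List.getD_eq_getElem?_getD, List.getElem?_set_ne h]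

theorem pv_getD_set_self (streak : List Int) (i : Nat) (w : Int) (h : i < streak.length) :
    (streak.set i w).getD i 0 = w := by
  simp [List.getD_eq_getElem?_getD, List.getElem?_set_self h]

-- hoisting max out of pvColScan
theorem pvColScan_hoist (rows : List String) (c : Nat) :
    ∀ (cur m v : Int), pvColScan rows c cur (max m v) = max (pvColScan rows c cur m) v := by
  induction rows with
  | nil => intro cur m v; rfl
  | cons r rest ih =>
    intro cur m v
    by_cases hc : c < r.toList.length
    · by_cases hch : r.toList.getD c ' ' = '#'
      · simp only [pvColScan, if_pos hc, if_pos hch, pv_if_gt_max]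
        rw [max_right_comm m v (cur + 1), ih]
      · simp only [pvColScan, if_pos hc, if_neg hch]; exact ih _ _ _
    · simp only [pvColScan, if_neg hc]; exact ih _ _ _

-- the m-component of A's inner loop, with the streak read through a function
def pvRowM : List Char → Nat → (Nat → Int) → Int → Int
  | [], _, _, m => m
  | ch :: t, idx, f, m =>
    if ch = '#' then pvRowM t (idx + 1) f (max m (f idx + 1)) else pvRowM t (idx + 1) f m

theorem pvRowM_congr (chars : List Char) :
    ∀ (idx : Nat) (f g : Nat → Int) (m : Int), (∀ c, idx ≤ c → f c = g c) →
      pvRowM chars idx f m = pvRowM chars idx g m := by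
  induction chars with
  | nil => intro _ _ _ _ _; rfl
  | cons ch t ih =>
    intro idx f g m h
    by_cases hch : ch = '#'
    · simp only [pvRowM, if_pos hch, h idx (le_refl idx)]
      exact ih _ _ _ _ (fun c hc => h c (by omega))
    · simp only [pvRowM, if_neg hch]
      exact ih _ _ _ _ (fun c hc => h c (by omega))

theorem pvInnerA_snd (chars : List Char) :
    ∀ (idx : Nat) (streak : List Int) (m : Int),
      (pvInnerA chars idx streak m).2 = pvRowM chars idx (fun c => streak.getD c 0) m := by
  induction chars with
  | nil => intro _ _ _; rfl
  | cons ch t ih =>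
    intro idx streak m
    by_cases hch : ch = '#'
    · simp only [pvInnerA, if_pos hch, pvRowM, pv_if_gt_max]
      rw [ih]
      exact pvRowM_congr t _ _ _ _ (fun c hc => pv_getD_set_ne streak idx c _ (by omega))
    · simp only [pvInnerA, if_neg hch, pvRowM]
      rw [ih]
      exact pvRowM_congr t _ _ _ _ (fun c hc => pv_getD_set_ne streak idx c _ (by omega))

theorem pvInnerA_length (chars : List Char) :
    ∀ (idx : Nat) (streak : List Int) (m : Int),
      (pvInnerA chars idx streak m).1.length = streak.length := by
  induction chars with
  | nil => intro _ _ _; rfl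
  | cons ch t ih =>
    intro idx streak m
    by_cases hch : ch = '#'
    · simp only [pvInnerA, if_pos hch]; rw [ih]; simp
    · simp only [pvInnerA, if_neg hch]; rw [ih]; simp

theorem pvInnerA_fst_getD (chars : List Char) :
    ∀ (idx : Nat) (streak : List Int) (m : Int) (c : Nat), c < streak.length →
      (pvInnerA chars idx streak m).1.getD c 0 =
        if idx ≤ c ∧ c - idx < chars.length then
          (if chars.getD (c - idx) ' ' = '#' then streak.getD c 0 + 1 else 0)
        else streak.getD c 0 := by
  induction chars with
  | nil =>
    intro idx streak m c hc
    simp only [pvInnerA, List.length_nil]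
    rw [if_neg (by omega)]
  | cons ch t ih =>
    intro idx streak m c hc
    by_cases hch : ch = '#'
    · simp only [pvInnerA, if_pos hch]
      rw [ih _ _ _ _ (by simpa using hc)]
      rcases Nat.lt_trichotomy c idx with hlt | heq | hgt
      · rw [if_neg (by omega), if_neg (by omega), pv_getD_set_ne _ _ _ _ (by omega)]
      · subst heq
        rw [if_neg (by omega), pv_getD_set_self _ _ _ hc,
          if_pos (show c ≤ c ∧ c - c < (ch :: t).length by
            exact ⟨le_refl c, by simp⟩),
          Nat.sub_self, List.getD_cons_zero, if_pos hch]
      · rw [pv_getD_set_ne _ _ _ _ (by omega)]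
        by_cases hin : idx + 1 ≤ c ∧ c - (idx + 1) < t.length
        · rw [if_pos hin,
            if_pos (show idx ≤ c ∧ c - idx < (ch :: t).length by
              simp only [List.length_cons]; omega),
            show c - idx = (c - (idx + 1)) + 1 from by omega, List.getD_cons_succ]
        · rw [if_neg hin, if_neg (by simp only [List.length_cons]; omega)]
    · simp only [pvInnerA, if_neg hch]
      rw [ih _ _ _ _ (by simpa using hc)]
      rcases Nat.lt_trichotomy c idx with hlt | heq | hgt
      · rw [if_neg (by omega), if_neg (by omega), pv_getD_set_ne _ _ _ _ (by omega)]
      · subst heq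
        rw [if_neg (by omega), pv_getD_set_self _ _ _ hc,
          if_pos (show c ≤ c ∧ c - c < (ch :: t).length by
            exact ⟨le_refl c, by simp⟩),
          Nat.sub_self, List.getD_cons_zero, if_neg hch]
      · rw [pv_getD_set_ne _ _ _ _ (by omega)]
        by_cases hin : idx + 1 ≤ c ∧ c - (idx + 1) < t.length
        · rw [if_pos hin,
            if_pos (show idx ≤ c ∧ c - idx < (ch :: t).length by
              simp only [List.length_cons]; omega),
            show c - idx = (c - (idx + 1)) + 1 from by omega, List.getD_cons_succ]
        · rw [if_neg hin, if_neg (by simp only [List.length_cons]; omega)]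

-- pvRowM as a fold over the row's column indices
theorem pvRowM_eq_foldl (chars : List Char) :
    ∀ (idx : Nat) (f : Nat → Int) (m : Int),
      pvRowM chars idx f m =
        (List.range chars.length).foldl
          (fun m j => if chars.getD j ' ' = '#' then max m (f (idx + j) + 1) else m) m := by
  induction chars with
  | nil => intro _ _ _; rfl
  | cons ch t ih =>
    intro idx f m
    simp only [List.length_cons, List.range_succ_eq_map, List.foldl_cons, List.foldl_map,
      List.getD_cons_zero, List.getD_cons_succ]
    by_cases hch : ch = '#'
    · simp only [pvRowM, if_pos hch]
      rw [ih]
      exact PySem.List.foldl_congr_mem _ _ _ _ (fun m' j _ => by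
        simp only [Nat.succ_eq_add_one]
        rw [Nat.add_comm j 1, ← Nat.add_assoc])
    · simp only [pvRowM, if_neg hch]
      rw [ih]
      exact PySem.List.foldl_congr_mem _ _ _ _ (fun m' j _ => by
        simp only [Nat.succ_eq_add_one]
        rw [Nat.add_comm j 1, ← Nat.add_assoc])

-- F c commutes with a fold of max-steps
theorem pv_fold_comm (F : Nat → Int → Int) (step : Int → Nat → Int)
    (hcomm : ∀ c c' m, F c (step m c') = step (F c m) c') :
    ∀ (cs : List Nat) (c : Nat) (x : Int),
      cs.foldl step (F c x) = F c (cs.foldl step x) := by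
  intro cs
  induction cs with
  | nil => intro _ _; rfl
  | cons c' t ih =>
    intro c x
    simp only [List.foldl_cons]
    rw [← hcomm, ih]

-- pushing one row's max-updates ahead of the per-column scans
theorem pv_fold_push (F : Nat → Int → Int) (step : Int → Nat → Int)
    (hcomm : ∀ c c' m, F c (step m c') = step (F c m) c') :
    ∀ (cs : List Nat) (m : Int),
      cs.foldl (fun m c => F c (step m c)) m = cs.foldl (fun m c => F c m) (cs.foldl step m) := by
  intro cs
  induction cs with
  | nil => intro _; rfl
  | cons c t ih =>
    intro m
    simp only [List.foldl_cons]
    rw [ih, pv_fold_comm F step hcomm]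

theorem pv_foldl_id {α : Type} (l : List α) (m : Int) :
    l.foldl (fun m _ => m) m = m := by
  induction l with
  | nil => rfl
  | cons x t ih => rw [List.foldl_cons]; exact ih

theorem pv_foldl_range_extend (step : Int → Nat → Int) (n k : Nat)
    (h : ∀ m c, n ≤ c → step m c = m) :
    ∀ (m : Int), (List.range (n + k)).foldl step m = (List.range n).foldl step m := by
  intro m
  rw [List.range_add, List.foldl_append, List.foldl_map]
  exact (PySem.List.foldl_congr_mem (List.range k) _ (fun m _ => m) _
    (fun acc x _ => h acc (n + x) (by omega))).trans (pv_foldl_id _ _)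

-- one row's contribution, factored per column: the max-update, the new streak value, the scan of the rest
def pvStep (r : String) (streak : List Int) (m : Int) (c : Nat) : Int :=
  if c < r.toList.length ∧ r.toList.getD c ' ' = '#' then max m (streak.getD c 0 + 1) else m

def pvNewCur (r : String) (streak : List Int) (c : Nat) : Int :=
  if c < r.toList.length then (if r.toList.getD c ' ' = '#' then streak.getD c 0 + 1 else 0)
  else streak.getD c 0

def pvF (rest : List String) (r : String) (streak : List Int) (c : Nat) (m : Int) : Int :=
  pvColScan rest c (pvNewCur r streak c) m

theorem pvF_comm (rest : List String) (r : String) (streak : List Int) (c c' : Nat) (m : Int) :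
    pvF rest r streak c (pvStep r streak m c') = pvStep r streak (pvF rest r streak c m) c' := by
  unfold pvF pvStep
  by_cases h : c' < r.toList.length ∧ r.toList.getD c' ' ' = '#'
  · rw [if_pos h, if_pos h]; exact pvColScan_hoist rest c _ m _
  · rw [if_neg h, if_neg h]

theorem pvColScan_cons_eq (rest : List String) (r : String) (streak : List Int) (c : Nat)
    (m : Int) :
    pvColScan (r :: rest) c (streak.getD c 0) m = pvF rest r streak c (pvStep r streak m c) := by
  unfold pvF pvStep pvNewCur
  by_cases h1 : c < r.toList.length
  · by_cases h2 : r.toList.getD c ' ' = '#'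
    · simp only [pvColScan, if_pos h1, if_pos h2, if_pos (And.intro h1 h2), pv_if_gt_max]
    · simp only [pvColScan, if_pos h1, if_neg h2, if_neg (fun h : _ ∧ _ => h2 h.2)]
  · simp only [pvColScan, if_neg h1, if_neg (fun h : _ ∧ _ => h1 h.1)]

theorem pv_main (rows : List String) :
    ∀ (streak : List Int) (m : Int), (∀ r ∈ rows, r.toList.length ≤ streak.length) →
      (pvOuterA rows streak m).2 =
        (List.range streak.length).foldl
          (fun m c => pvColScan rows c (streak.getD c 0) m) m := by
  induction rows with
  | nil =>
    intro streak m _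
    simp only [pvOuterA]
    exact ((PySem.List.foldl_congr_mem _ _ (fun m _ => m) m (fun acc c _ => rfl)).trans
      (pv_foldl_id _ _)).symm
  | cons r rest ih =>
    intro streak m hlen
    have hrL : r.toList.length ≤ streak.length := hlen r (by simp)
    simp only [pvOuterA]
    rw [ih _ _ (fun r' hr' => by
        rw [pvInnerA_length]; exact hlen r' (List.mem_cons_of_mem _ hr')),
      pvInnerA_length]
    -- the streak after row r, pointwise
    rw [PySem.List.foldl_congr_mem _ _ (fun m c => pvF rest r streak c m) _ (fun acc c hc => by
        unfold pvF pvNewCur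
        rw [pvInnerA_fst_getD _ _ _ _ _ (List.mem_range.mp hc)]
        simp only [Nat.zero_le, true_and, Nat.sub_zero])]
    -- the max after row r, as a fold of pvStep over all columns
    rw [pvInnerA_snd, pvRowM_eq_foldl]
    simp only [Nat.zero_add]
    rw [PySem.List.foldl_congr_mem (List.range r.toList.length) _
      (pvStep r streak) m (fun acc j hj => by
        have hjn := List.mem_range.mp hj
        show _ = pvStep r streak acc j
        unfold pvStep
        by_cases hch : r.toList.getD j ' ' = '#'
        · rw [if_pos hch, if_pos (And.intro hjn hch)]
        · rw [if_neg hch, if_neg (fun h : _ ∧ _ => hch h.2)])]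
    have hext : (List.range streak.length).foldl (pvStep r streak) m =
        (List.range r.toList.length).foldl (pvStep r streak) m := by
      have hnk : r.toList.length + (streak.length - r.toList.length) = streak.length := by omega
      rw [← hnk]
      exact pv_foldl_range_extend _ _ _ (fun m' c hc => by
        show pvStep r streak m' c = m'
        unfold pvStep; exact if_neg (fun h : _ ∧ _ => absurd h.1 (by omega))) m
    rw [← hext, ← pv_fold_push (pvF rest r streak) (pvStep r streak)
      (fun c c' m' => pvF_comm rest r streak c c' m')]
    exact PySem.List.foldl_congr_mem _ _ _ _ (fun acc c _ =>
      (pvColScan_cons_eq rest r streak c acc).symm)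

-- ===== VERDICT (by name: the statement is the Claim_ definition above) =====
theorem tallest_building_height_spec : Claim_equal_tallest_building_height := by
  intro buildings _
  show PySem.Int.toStr ((pvOuterA buildings (List.replicate (pvLongest buildings) 0) 0).2 * 20) ++ "m" =
    PySem.Int.toStr
      ((List.range (buildings.foldl (fun a r => max a r.toList.length) 0)).foldl
        (fun best c => pvColScan buildings c 0 best) 0 * 20) ++ "m"
  have hlong := pvLongest_eq buildings
  have hmain := pv_main buildings (List.replicate (pvLongest buildings) 0) 0 (fun r hr => by
    simp only [List.length_replicate]
    rw [hlong]
    exact pv_le_foldl_max buildings 0 r hr)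
  rw [hmain, List.length_replicate,
    PySem.List.foldl_congr_mem (List.range (pvLongest buildings)) _
      (fun best c => pvColScan buildings c 0 best) 0 (fun acc c hc => by
        rw [List.getD_replicate 0 (List.mem_range.mp hc)]),
    hlong]
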